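-- pv_equiv track=rewrite | github.com/gunwooKim-Korea/codility | MACH.py | solution
-- ===== SOURCE A (Python) =====
-- def solution(A, M):
--
--     result = 0
--
--     m = [0 for _ in range(M)]
--
--     for i in range(0, len(A)):
--         m[(A[i]) % M] += 1
--
--     for i in m:
--         if(i > result):
--             result = i
--
--     return result
-- ===== SOURCE B (Python) =====
-- def solution(A, M):
--     r = sorted(a % M for a in A)
--     best = 0
--     run = 0
--     prev = None
--     for x in r:
--         if run > 0 and x == prev:
--             run += 1
--         else:
--             run = 1
--             prev = x
--         if run > best:
--             best = run
--     return best
-- ===== Notes on version B (the rewrite author's own statement) =====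
-- stated objective: alternative
-- what changed: Replaced the size-M residue frequency table plus table-max pass by sorting the residues and a single run-length scan over the sorted list.
import Mathlib
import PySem

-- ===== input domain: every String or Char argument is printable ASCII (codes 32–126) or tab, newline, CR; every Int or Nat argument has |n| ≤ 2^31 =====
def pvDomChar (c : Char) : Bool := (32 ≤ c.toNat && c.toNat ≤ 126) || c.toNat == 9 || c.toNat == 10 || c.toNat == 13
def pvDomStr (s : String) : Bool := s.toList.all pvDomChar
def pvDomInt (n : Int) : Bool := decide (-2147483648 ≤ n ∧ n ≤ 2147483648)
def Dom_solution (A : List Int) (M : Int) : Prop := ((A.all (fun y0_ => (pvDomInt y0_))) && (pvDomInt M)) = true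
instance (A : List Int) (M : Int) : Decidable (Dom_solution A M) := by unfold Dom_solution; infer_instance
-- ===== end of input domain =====

-- B replaces A's size-M residue frequency table by sorting the residues and one run-length scan (alternative algorithm, same results).

-- ===== PORT A =====
def solution (A : List Int) (M : Int) : Int :=
  -- result = 0 ; m = [0 for _ in range(M)]
  let m0 : List Int := (PySem.List.pyRange 0 M 1).map (fun _ => (0 : Int))
  -- for i in range(0, len(A)): m[(A[i]) % M] += 1   (i is in range, and under Pre_ the table index is too, so pyGetD/pySetD are exact here)
  let m := (PySem.List.pyRange 0 (A.length : Int) 1).foldl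
      (fun m i =>
        PySem.List.pySetD m (PySem.Int.mod (PySem.List.pyGetD A i 0) M)
          (PySem.List.pyGetD m (PySem.Int.mod (PySem.List.pyGetD A i 0) M) 0 + 1)) m0
  -- for i in m: if i > result: result = i
  m.foldl (fun result i => if i > result then i else result) 0

-- ===== PORT B =====
-- body of Source B's loop: state (prev, run, best); 'if run > 0 and x == prev: run += 1 else: run = 1; prev = x', then 'if run > best: best = run'
def bStep (st : Option Int × Int × Int) (x : Int) : Option Int × Int × Int :=
  if st.2.1 > 0 ∧ st.1 = some x then
    (st.1, st.2.1 + 1, if st.2.1 + 1 > st.2.2 then st.2.1 + 1 else st.2.2)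
  else
    (some x, 1, if (1 : Int) > st.2.2 then 1 else st.2.2)

def solution_alt (A : List Int) (M : Int) : Int :=
  -- r = sorted(a % M for a in A)
  let r := PySem.List.sorted (A.map (fun a => PySem.Int.mod a M)) (fun x => x) false
  -- best = 0; run = 0; prev = None; for x in r: …; return best
  (r.foldl bStep (none, 0, 0)).2.2

-- ===== PRECONDITION & SPEC =====
-- Pre_ excludes exactly the raising inputs: nonempty A with M ≤ 0 (M = 0: ZeroDivisionError; M < 0: IndexError on the empty table).
def Pre_solution (A : List Int) (M : Int) : Prop := A = [] ∨ 0 < M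
instance (A : List Int) (M : Int) : Decidable (Pre_solution A M) := by unfold Pre_solution; infer_instance
def pvWitness_solution : List Int × Int := ([1, 2, 1], 2)

def Spec_solution (A : List Int) (M : Int) (out : Int) : Prop := out = solution_alt A M
instance (A : List Int) (M : Int) (out : Int) : Decidable (Spec_solution A M out) := by unfold Spec_solution; infer_instance

-- ===== CLAIM (what is proved, stated in full; the proofs are below) =====
def Claim_equal_solution : Prop := ∀ (A : List Int) (M : Int), Dom_solution A M → Pre_solution A M → Spec_solution A M (solution A M)


-- ===== LEMMAS AND PROOFS =====

-- the second loop of A is a running maximum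
theorem fmax_spec (l : List Int) (b0 : Int) :
    b0 ≤ l.foldl (fun result i => if i > result then i else result) b0 ∧
    (∀ x ∈ l, x ≤ l.foldl (fun result i => if i > result then i else result) b0) ∧
    (l.foldl (fun result i => if i > result then i else result) b0 = b0 ∨
      l.foldl (fun result i => if i > result then i else result) b0 ∈ l) := by
  induction l generalizing b0 with
  | nil => simp
  | cons x l ih =>
    simp only [List.foldl_cons]
    obtain ⟨h1, h2, h3⟩ := ih (if x > b0 then x else b0)
    refine ⟨?_, ?_, ?_⟩
    · have : b0 ≤ (if x > b0 then x else b0) := by split <;> omega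
      omega
    · intro y hy
      rcases List.mem_cons.mp hy with rfl | hy
      · have : y ≤ (if y > b0 then y else b0) := by split <;> omega
        omega
      · exact h2 y hy
    · rcases h3 with h | h
      · rw [h]
        by_cases hx : x > b0
        · simp [hx, List.mem_cons]
        · simp [hx]
      · right; exact List.mem_cons_of_mem _ h

-- setting one slot of a tabulated list re-tabulates it
theorem set_map_range (N j : Nat) (f : Nat → Int) (v : Int) (_h : j < N) :
    ((List.range N).map f).set j v = (List.range N).map (fun k => if k = j then v else f k) := by
  apply List.ext_getElem
  · simp
  · intro n h1 h2
    have hn : n < N := by simpa using h2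
    simp only [List.getElem_set, List.getElem_map, List.getElem_range]
    split_ifs <;> first | rfl | omega

-- A's first loop builds the residue-count table
theorem table_eq (M : Int) (hM : 0 < M) (L : List Int) (f : Nat → Int) :
    L.foldl (fun m a =>
        PySem.List.pySetD m (PySem.Int.mod a M)
          (PySem.List.pyGetD m (PySem.Int.mod a M) 0 + 1))
      ((List.range M.toNat).map f)
    = (List.range M.toNat).map
        (fun k => f k + (((L.map (fun a => PySem.Int.mod a M)).count (k : Int) : Nat) : Int)) := by
  induction L generalizing f with
  | nil => simp
  | cons a L ih =>
    simp only [List.foldl_cons]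
    have h0 : (0 : Int) ≤ PySem.Int.mod a M := PySem.Int.mod_nonneg a hM
    have h1 : PySem.Int.mod a M < M := PySem.Int.mod_lt a hM
    set idx := PySem.Int.mod a M with hidx
    have hlt : idx.toNat < M.toNat := by omega
    have hget : PySem.List.pyGetD ((List.range M.toNat).map f) idx 0 = f idx.toNat := by
      rw [PySem.List.pyGetD_eq_getElem _ _ h0 (by simp; omega)]
      simp
    have hset : PySem.List.pySetD ((List.range M.toNat).map f) idx (f idx.toNat + 1)
        = (List.range M.toNat).map (fun k => if k = idx.toNat then f idx.toNat + 1 else f k) := by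
      rw [PySem.List.pySetD_of_nonneg _ _ h0, set_map_range _ _ _ _ hlt]
    rw [hget, hset, ih]
    apply List.map_congr_left
    intro k hk
    have hkN : k < M.toNat := List.mem_range.mp hk
    by_cases hkj : k = idx.toNat
    · have hki : PySem.Int.mod a M = ((k : Nat) : Int) := by rw [← hidx]; omega
      simp [hkj, hki]
      try omega
    · have hki : ¬ (PySem.Int.mod a M = ((k : Nat) : Int)) := by rw [← hidx]; omega
      simp [hkj, hki]
      try omega

-- helper for the proofs: the scan of Source B from an arbitrary state
def scanB (st : Option Int × Int × Int) (l : List Int) : Int := (l.foldl bStep st).2.2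

theorem scanB_cons (st : Option Int × Int × Int) (x : Int) (l : List Int) :
    scanB st (x :: l) = scanB (bStep st x) l := rfl

theorem bStep_eq (prev : Option Int) (run B x : Int) :
    bStep (prev, run, B) x =
      (if run > 0 ∧ prev = some x
        then ((prev, run + 1, if run + 1 > B then run + 1 else B) : Option Int × Int × Int)
        else (some x, 1, if (1 : Int) > B then 1 else B)) := by
  simp [bStep]

-- best is a max-accumulator independent of the (prev, run) evolution
theorem scanB_max (l : List Int) : ∀ (prev : Option Int) (run b1 b2 : Int),
    scanB (prev, run, max b1 b2) l = max b2 (scanB (prev, run, b1) l) := by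
  induction l with
  | nil => intro prev run b1 b2; simp only [scanB, List.foldl_nil]; omega
  | cons x l ih =>
    intro prev run b1 b2
    rw [scanB_cons, scanB_cons, bStep_eq, bStep_eq]
    by_cases hc : run > 0 ∧ prev = some x
    · rw [if_pos hc, if_pos hc]
      have e : (if run + 1 > max b1 b2 then run + 1 else max b1 b2)
          = max (if run + 1 > b1 then run + 1 else b1) b2 := by split_ifs <;> omega
      rw [e]; exact ih prev (run + 1) _ b2
    · rw [if_neg hc, if_neg hc]
      have e : (if (1 : Int) > max b1 b2 then 1 else max b1 b2)
          = max (if (1 : Int) > b1 then 1 else b1) b2 := by split_ifs <;> omega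
      rw [e]; exact ih _ 1 _ b2

-- the scan on a sorted tail: the current run extends exactly over the leading equal block
theorem scanB_sorted : ∀ (l : List Int), l.Pairwise (· ≤ ·) →
    ∀ (p run best : Int), 0 < run → run ≤ best → (∀ x ∈ l, p ≤ x) →
    scanB (some p, run, best) l
      = max best (max (run + ((l.count p : Nat) : Int))
          (scanB (none, 0, 0) (l.filter (fun y => y ≠ p)))) := by
  intro l
  induction l with
  | nil =>
    intro _ p run best h1 h2 _
    simp only [scanB, List.foldl_nil, List.filter_nil, List.count_nil]
    omega
  | cons y l ih =>
    intro hp p run best hrun hbest hall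
    have hy : ∀ b ∈ l, y ≤ b := (List.pairwise_cons.mp hp).1
    have hl : l.Pairwise (· ≤ ·) := (List.pairwise_cons.mp hp).2
    have hpy : p ≤ y := hall y List.mem_cons_self
    rw [scanB_cons]
    by_cases hyp : y = p
    · subst hyp
      have e1 : bStep (some y, run, best) y = (some y, run + 1, max best (run + 1)) := by
        have h : (if run + 1 > best then run + 1 else best) = max best (run + 1) := by
          split_ifs <;> omega
        rw [bStep_eq, if_pos ⟨hrun, rfl⟩, h]
      rw [e1, ih hl y (run + 1) (max best (run + 1)) (by omega) (by omega) hy]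
      have hfil : (y :: l).filter (fun z => z ≠ y) = l.filter (fun z => z ≠ y) := by simp
      have hcnt : (y :: l).count y = l.count y + 1 := List.count_cons_self
      rw [hfil, hcnt]
      have hc0 : (0 : Int) ≤ ((l.count y : Nat) : Int) := by positivity
      push_cast
      omega
    · have hplt : p < y := lt_of_le_of_ne hpy (Ne.symm hyp)
      have hnotmem : p ∉ y :: l := by
        intro hm
        rcases List.mem_cons.mp hm with h | h
        · exact hyp h.symm
        · have := hy p h; omega
      have hcnt : (y :: l).count p = 0 := List.count_eq_zero.mpr hnotmem
      have hfil : (y :: l).filter (fun z => z ≠ p) = y :: l := by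
        apply List.filter_eq_self.mpr
        intro z hz
        simp only [ne_eq, decide_eq_true_eq]
        intro h; subst h; exact hnotmem hz
      have e1 : bStep (some p, run, best) y = (some y, 1, best) := by
        have hc : ¬(run > 0 ∧ (some p : Option Int) = some y) := by
          rintro ⟨-, h⟩
          exact hyp (Option.some.inj h).symm
        have h : (if (1 : Int) > best then 1 else best) = best := by split_ifs <;> omega
        rw [bStep_eq, if_neg hc, h]
      have e3 : scanB ((none : Option Int), (0 : Int), (0 : Int)) (y :: l)
          = scanB (some y, 1, 1) l := by
        rw [scanB_cons]
        have : bStep ((none : Option Int), (0 : Int), (0 : Int)) y = (some y, 1, 1) := by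
          norm_num [bStep]
        rw [this]
      have e2 : scanB (some y, 1, best) l = max best (scanB (some y, 1, 1) l) := by
        have h : best = max 1 best := by omega
        calc scanB (some y, 1, best) l = scanB (some y, 1, max 1 best) l := by rw [← h]
          _ = max best (scanB (some y, 1, 1) l) := scanB_max l (some y) 1 1 best
      rw [e1, hfil, hcnt, e3, e2]
      omega

-- characterisation of B's result on a sorted list: it is the maximal multiplicity
theorem scanB_facts : ∀ (n : Nat) (l : List Int), l.length ≤ n → l.Pairwise (· ≤ ·) →
    0 ≤ scanB (none, 0, 0) l ∧
    (∀ x ∈ l, ((l.count x : Nat) : Int) ≤ scanB (none, 0, 0) l) ∧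
    (scanB (none, 0, 0) l = 0 ∨ ∃ x ∈ l, scanB (none, 0, 0) l = ((l.count x : Nat) : Int)) := by
  intro n
  induction n with
  | zero =>
    intro l hlen _
    have : l = [] := List.eq_nil_of_length_eq_zero (by omega)
    subst this
    simp [scanB]
  | succ n ih =>
    intro l hlen hsort
    match l with
    | [] => simp [scanB]
    | x :: l =>
      have hx : ∀ b ∈ l, x ≤ b := (List.pairwise_cons.mp hsort).1
      have hl : l.Pairwise (· ≤ ·) := (List.pairwise_cons.mp hsort).2
      have hfl : (l.filter (fun y => y ≠ x)).length ≤ n :=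
        le_trans (List.length_filter_le _ _) (by simpa using Nat.le_of_succ_le_succ hlen)
      have hfs : (l.filter (fun y => y ≠ x)).Pairwise (· ≤ ·) := List.Pairwise.filter _ hl
      obtain ⟨hX0, hX1, hX2⟩ := ih _ hfl hfs
      have e0 : scanB ((none : Option Int), (0 : Int), (0 : Int)) (x :: l)
          = scanB (some x, 1, 1) l := by
        rw [scanB_cons]
        have : bStep ((none : Option Int), (0 : Int), (0 : Int)) x = (some x, 1, 1) := by
          norm_num [bStep]
        rw [this]
      have e1 := scanB_sorted l hl x 1 1 one_pos le_rfl hx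
      have hc0 : (0 : Int) ≤ ((l.count x : Nat) : Int) := by positivity
      have e2 : scanB ((none : Option Int), (0 : Int), (0 : Int)) (x :: l)
          = max (1 + ((l.count x : Nat) : Int))
              (scanB (none, 0, 0) (l.filter (fun y => y ≠ x))) := by
        rw [e0, e1]; omega
      refine ⟨by rw [e2]; omega, ?_, ?_⟩
      · intro y hy
        rcases List.mem_cons.mp hy with rfl | hy
        · rw [e2, List.count_cons_self]; push_cast; omega
        · by_cases hyx : y = x
          · subst hyx
            rw [e2, List.count_cons_self]; push_cast; omega
          · have hcy : (x :: l).count y = (l.filter (fun z => z ≠ x)).count y := by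
              rw [List.count_cons_of_ne (Ne.symm hyx), List.count_filter (by simp [hyx])]
            have hymem : y ∈ l.filter (fun z => z ≠ x) :=
              List.mem_filter.mpr ⟨hy, by simp [hyx]⟩
            have := hX1 y hymem
            rw [e2, hcy]
            omega
      · rcases max_choice (1 + ((l.count x : Nat) : Int))
            (scanB ((none : Option Int), (0 : Int), (0 : Int)) (l.filter (fun y => y ≠ x))) with h | h
        · right
          refine ⟨x, List.mem_cons_self, ?_⟩
          rw [e2, h, List.count_cons_self]; push_cast; omega
        · rcases hX2 with hz | ⟨y, hymem, hyv⟩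
          · right
            refine ⟨x, List.mem_cons_self, ?_⟩
            rw [e2, hz, List.count_cons_self]
            push_cast
            omega
          · right
            have hyx : y ≠ x := by
              have := (List.mem_filter.mp hymem).2
              simpa using this
            refine ⟨y, List.mem_cons_of_mem _ (List.mem_filter.mp hymem).1, ?_⟩
            rw [e2, h, hyv, List.count_cons_of_ne (Ne.symm hyx),
              List.count_filter (by simp [hyx])]

-- ===== VERDICT (by name: the statement is the Claim_ definition above) =====
theorem solution_spec : Claim_equal_solution := by
  unfold Claim_equal_solution
  intro A M _ hpre
  unfold Spec_solution
  by_cases hM : 0 < M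
  · set r0 := A.map (fun a => PySem.Int.mod a M) with hr0
    set r := PySem.List.sorted r0 (fun x => x) false with hr
    have hperm : r.Perm r0 := PySem.List.sorted_perm r0 (fun x => x) false
    have hsort : r.Pairwise (· ≤ ·) := by
      simpa using PySem.List.sorted_pairwise r0 (fun x => x)
    have hA : solution A M = List.foldl (fun result i => if i > result then i else result) 0
        ((List.range M.toNat).map (fun k => ((r0.count ((k : Nat) : Int) : Nat) : Int))) := by
      simp only [solution]
      rw [show (PySem.List.pyRange 0 M 1).map (fun _ => (0 : Int))
            = (List.range M.toNat).map (fun _ => (0 : Int)) from by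
          simp [PySem.List.pyRange_one, List.map_map, Function.comp_def]]
      rw [PySem.List.foldl_pyRange_zero_pyGetD' A (0 : Int)
          (fun m a => PySem.List.pySetD m (PySem.Int.mod a M)
            (PySem.List.pyGetD m (PySem.Int.mod a M) 0 + 1))
          ((List.range M.toNat).map (fun _ => (0 : Int)))]
      rw [table_eq M hM A (fun _ => (0 : Int))]
      simp only [zero_add]
      rw [hr0]
    have hB : solution_alt A M = scanB (none, 0, 0) r := by
      rw [hr, hr0]; rfl
    obtain ⟨ha0, ha1, ha2⟩ :=
      fmax_spec ((List.range M.toNat).map (fun k => ((r0.count ((k : Nat) : Int) : Nat) : Int))) 0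
    obtain ⟨hb0, hb1, hb2⟩ := scanB_facts r.length r le_rfl hsort
    have hcnt : ∀ x : Int, r.count x = r0.count x := fun x => hperm.count_eq x
    have hbound : ∀ x ∈ r0, 0 ≤ x ∧ x < M := by
      intro x hx
      rw [hr0] at hx
      obtain ⟨a, -, rfl⟩ := List.mem_map.mp hx
      exact ⟨PySem.Int.mod_nonneg a hM, PySem.Int.mod_lt a hM⟩
    rw [hA, hB]
    apply le_antisymm
    · rcases ha2 with h | h
      · omega
      · obtain ⟨k, hk, hkv⟩ := List.mem_map.mp h
        by_cases hz : r0.count ((k : Nat) : Int) = 0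
        · rw [← hkv, hz]
          simpa using hb0
        · have hmemr : ((k : Nat) : Int) ∈ r :=
            hperm.mem_iff.mpr (List.count_pos_iff.mp (Nat.pos_of_ne_zero hz))
          have := hb1 _ hmemr
          rw [hcnt] at this
          omega
    · rcases hb2 with h | h
      · omega
      · obtain ⟨x, hxr, hxv⟩ := h
        have hx0 : x ∈ r0 := hperm.mem_iff.mp hxr
        obtain ⟨hge, hlt⟩ := hbound x hx0
        have hk : x.toNat < M.toNat := by omega
        have hxx : ((x.toNat : Nat) : Int) = x := Int.toNat_of_nonneg hge
        have hmem2 : ((r0.count ((x.toNat : Nat) : Int) : Nat) : Int)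
            ∈ (List.range M.toNat).map (fun k => ((r0.count ((k : Nat) : Int) : Nat) : Int)) :=
          List.mem_map.mpr ⟨x.toNat, List.mem_range.mpr hk, rfl⟩
        have := ha1 _ hmem2
        rw [hxx] at this
        rw [hxv, hcnt]
        omega
  · have hnil : A = [] := by
      rcases hpre with h | h
      · exact h
      · omega
    subst hnil
    have hr : PySem.List.pyRange 0 M 1 = [] := PySem.List.pyRange_one_eq_nil (by omega)
    have h1 : solution [] M = 0 := by simp [solution, hr]
    have h2 : solution_alt [] M = 0 := rfl
    rw [h1, h2]
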